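-- pv_equiv track=rewrite | github.com/ashh-er/instagram-username-availability | instagram.py | is_valid_instagram_username
-- ===== SOURCE A (Python) =====
-- ALLOWED = "abcdefghijklmnopqrstuvwxyz0123456789._"
--
-- MIN_LEN = 1
--
-- MAX_LEN = 4  # can be increased to 30
--
-- def is_valid_instagram_username(username):
--     if not (MIN_LEN <= len(username) <= MAX_LEN):
--         return False
--     if username.startswith(".") or username.endswith("."):
--         return False
--     if ".." in username:
--         return False
--     for c in username:
--         if c not in ALLOWED:
--             return False
--     return True
-- ===== SOURCE B (Python) =====
-- ALLOWED = "abcdefghijklmnopqrstuvwxyz0123456789._"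
--
-- MIN_LEN = 1
--
-- MAX_LEN = 4
--
-- def is_valid_instagram_username(username):
--     # single left-to-right scan with the previous character as state:
--     # prev starts as '.' so a leading dot and a ".." pair are rejected by
--     # the same rule; the trailing-dot rule is the final check.
--     if not (MIN_LEN <= len(username) <= MAX_LEN):
--         return False
--     prev = '.'
--     for c in username:
--         if c not in ALLOWED:
--             return False
--         if c == '.' and prev == '.':
--             return False
--         prev = c
--     return username[-1] != '.'
-- ===== Notes on version B (the rewrite author's own statement) =====
-- stated objective: alternative
-- what changed: Replaced A's four separate checks (length, startswith/endswith, substring search for a double dot, per-character allowed loop) by one left-to-right scan carrying the previous character as state, with the state initialised to a dot so the leading-dot and double-dot rules collapse into a single rule.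
import Mathlib
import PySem

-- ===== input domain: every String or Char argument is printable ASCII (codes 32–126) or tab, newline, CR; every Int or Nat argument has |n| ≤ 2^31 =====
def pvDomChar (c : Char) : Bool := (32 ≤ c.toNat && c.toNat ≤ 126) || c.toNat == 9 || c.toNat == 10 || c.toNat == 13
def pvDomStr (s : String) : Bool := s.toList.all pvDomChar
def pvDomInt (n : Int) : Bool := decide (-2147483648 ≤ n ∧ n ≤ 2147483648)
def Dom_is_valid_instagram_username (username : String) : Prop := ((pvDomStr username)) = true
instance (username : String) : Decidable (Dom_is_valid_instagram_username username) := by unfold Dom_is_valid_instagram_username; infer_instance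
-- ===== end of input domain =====

-- B replaces A's four separate checks by one single scan with the previous character as state; same O(n), alternative structure.

-- ===== PORT A =====
def pvALLOWED : List Char := "abcdefghijklmnopqrstuvwxyz0123456789._".toList

def is_valid_instagram_username (username : String) : Bool :=
  if ¬ (1 ≤ PySem.Str.len username ∧ PySem.Str.len username ≤ 4) then false
  else if PySem.Str.startswith username "." || PySem.Str.endswith username "." then false
  else if PySem.Str.isIn ".." username then false
  -- 'for c in username: if c not in ALLOWED: return False' then 'return True'
  else username.toList.all (fun c => PySem.Chars.isIn [c] pvALLOWED)

-- ===== PORT B =====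
-- the scan loop: prev, then the remaining characters
def pvScan : Char → List Char → Bool
  | _, [] => true
  | prev, c :: rest =>
    if ¬ PySem.Chars.isIn [c] pvALLOWED then false
    else if c = '.' ∧ prev = '.' then false
    else pvScan c rest

def is_valid_instagram_username_alt (username : String) : Bool :=
  if ¬ (1 ≤ PySem.Str.len username ∧ PySem.Str.len username ≤ 4) then false
  else if ¬ pvScan '.' username.toList then false
  else PySem.Str.pyGet? username (-1) != some '.'

-- ===== PRECONDITION & SPEC =====
def Spec_is_valid_instagram_username (username : String) (out : Bool) : Prop := out = is_valid_instagram_username_alt username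
instance (username : String) (out : Bool) : Decidable (Spec_is_valid_instagram_username username out) := by unfold Spec_is_valid_instagram_username; infer_instance

-- ===== CLAIM (what is proved, stated in full; the proofs are below) =====
def Claim_equal_is_valid_instagram_username : Prop := ∀ (username : String), Dom_is_valid_instagram_username username → Spec_is_valid_instagram_username username (is_valid_instagram_username username)

-- ===== LEMMAS AND PROOFS =====

theorem pv_bool_eq_decide {P : Prop} [Decidable P] {b : Bool} (h : b = true ↔ P) : b = decide P := by
  cases b <;> simp_all

theorem pvScan_iff (l : List Char) : ∀ (prev : Char),
    pvScan prev l = true ↔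
      (∀ c ∈ l, PySem.Chars.isIn [c] pvALLOWED = true) ∧ ¬ (['.', '.'] <:+: (prev :: l)) := by
  induction l with
  | nil =>
    intro prev
    simp only [pvScan, List.not_mem_nil, false_implies, implies_true, true_and, true_iff]
    intro h
    have h2 := List.IsInfix.length_le h
    simp only [List.length_cons, List.length_nil] at h2
    omega
  | cons c rest ih =>
    intro prev
    have hpair : (['.', '.'] <:+: prev :: c :: rest) ↔
        ((prev = '.' ∧ c = '.') ∨ ['.', '.'] <:+: c :: rest) := by
      rw [List.infix_cons_iff]
      constructor
      · rintro (⟨t, ht⟩ | hi)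
        · left
          simp only [List.cons_append, List.nil_append, List.cons.injEq] at ht
          exact ⟨ht.1.symm, ht.2.1.symm⟩
        · right; exact hi
      · rintro (⟨h1, h2⟩ | hi)
        · left; subst h1; subst h2; exact ⟨rest, by simp⟩
        · right; exact hi
    simp only [pvScan]
    by_cases h1 : PySem.Chars.isIn [c] pvALLOWED = true
    · rw [if_neg (by simpa using h1)]
      by_cases h2 : c = '.' ∧ prev = '.'
      · rw [if_pos h2]
        simp only [Bool.false_eq_true, false_iff, not_and]
        rintro hall hnd
        exact hnd (hpair.mpr (Or.inl ⟨h2.2, h2.1⟩))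
      · rw [if_neg h2]
        rw [ih c]
        constructor
        · rintro ⟨hall, hnd⟩
          refine ⟨?_, ?_⟩
          · intro x hx
            rcases List.mem_cons.mp hx with rfl | hx
            · exact h1
            · exact hall x hx
          · intro hdd
            rcases hpair.mp hdd with ⟨hp, hc⟩ | hi
            · exact h2 ⟨hc, hp⟩
            · exact hnd hi
        · rintro ⟨hall, hnd⟩
          exact ⟨fun x hx => hall x (List.mem_cons_of_mem _ hx),
                 fun hi => hnd (hpair.mpr (Or.inr hi))⟩
    · rw [if_pos (by simpa using h1)]
      simp only [Bool.false_eq_true, false_iff, not_and]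
      intro hall
      exact absurd (hall c (by simp)) h1

theorem pvScan_dot (l : List Char) :
    pvScan '.' l = true ↔
      (∀ c ∈ l, PySem.Chars.isIn [c] pvALLOWED = true) ∧
        ¬ (['.'] <+: l) ∧ ¬ (['.', '.'] <:+: l) := by
  rw [pvScan_iff l '.', List.infix_cons_iff, List.cons_prefix_cons]
  tauto

theorem pv_suffix_singleton_iff (x : Char) (l : List Char) :
    ([x] <:+ l) ↔ l.getLast? = some x := by
  rw [List.getLast?_eq_some_iff]
  constructor
  · rintro ⟨t, ht⟩; exact ⟨t, ht.symm⟩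
  · rintro ⟨t, ht⟩; exact ⟨t, ht.symm⟩

-- ===== VERDICT (by name: the statement is the Claim_ definition above) =====
theorem is_valid_instagram_username_spec : Claim_equal_is_valid_instagram_username := by
  intro u _
  unfold Spec_is_valid_instagram_username is_valid_instagram_username is_valid_instagram_username_alt
  by_cases hL : 1 ≤ PySem.Str.len u ∧ PySem.Str.len u ≤ 4
  · rw [if_neg (not_not_intro hL), if_neg (not_not_intro hL)]
    have hne : u.toList ≠ [] := by
      intro h
      rw [PySem.Str.len_eq, h] at hL
      simp at hL
    have hsw : PySem.Str.startswith u "." = decide (['.'] <+: u.toList) := by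
      apply pv_bool_eq_decide
      rw [PySem.Str.startswith_eq]
      exact PySem.Chars.startswith_iff _ _
    have hew : PySem.Str.endswith u "." = decide (['.'] <:+ u.toList) := by
      apply pv_bool_eq_decide
      rw [PySem.Str.endswith_eq]
      exact PySem.Chars.endswith_iff _ _
    have hdd : PySem.Str.isIn ".." u = decide (['.', '.'] <:+: u.toList) := by
      apply pv_bool_eq_decide
      exact PySem.Str.isIn_iff_infix _ _
    have hall : (u.toList.all fun c => PySem.Chars.isIn [c] pvALLOWED)
        = decide (∀ c ∈ u.toList, PySem.Chars.isIn [c] pvALLOWED = true) := by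
      apply pv_bool_eq_decide
      exact List.all_eq_true
    have hscan : pvScan '.' u.toList
        = decide ((∀ c ∈ u.toList, PySem.Chars.isIn [c] pvALLOWED = true) ∧
            ¬ (['.'] <+: u.toList) ∧ ¬ (['.', '.'] <:+: u.toList)) := by
      apply pv_bool_eq_decide
      exact pvScan_dot _
    have hget : (PySem.Str.pyGet? u (-1) != some '.') = decide (¬ (['.'] <:+ u.toList)) := by
      simp only [PySem.Str.pyGet?_eq, PySem.Chars.pyGet?_eq_listPyGet?,
        PySem.List.pyGet?_neg_one, pv_suffix_singleton_iff]
      cases h : u.toList.getLast? with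
      | none => exact absurd (List.getLast?_eq_none_iff.mp h) hne
      | some a => by_cases ha : a = '.' <;> simp [ha]
    rw [hsw, hew, hdd, hall, hscan, hget]
    by_cases hS : ['.'] <+: u.toList <;>
      by_cases hE : ['.'] <:+ u.toList <;>
        by_cases hD : ['.', '.'] <:+: u.toList <;>
          by_cases hA : ∀ c ∈ u.toList, PySem.Chars.isIn [c] pvALLOWED = true <;>
            simp [hS, hE, hD, hA] <;> simp_all
  · rw [if_pos hL, if_pos hL]
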